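-- pv_equiv track=rewrite | github.com/netmsglog/usaco | wormhole.py | get_nextpoint_in_path
-- ===== SOURCE A (Python) =====
-- def get_nextpoint_in_path(ap, pt):
--     for idx in ap:
--         p = ap[idx]
--         for i in range(len(p)):
--             if p[i]==pt:
--                 if i+1 < len(p):
--                     return p[i+1]
--     return None
-- ===== SOURCE B (Python) =====
-- def get_nextpoint_in_path(ap, pt):
--     succ = {}
--     for p in ap.values():
--         for a, b in zip(p, p[1:]):
--             succ.setdefault(a, b)
--     return succ.get(pt)
-- ===== Notes on version B (the rewrite author's own statement) =====
-- stated objective: alternative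
-- what changed: Instead of scanning each list on the fly and returning at the first match, B first builds a successor dictionary (first-wins via setdefault over zip(p, p[1:]) of every list) and then answers with a single dictionary lookup.
import Mathlib
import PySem

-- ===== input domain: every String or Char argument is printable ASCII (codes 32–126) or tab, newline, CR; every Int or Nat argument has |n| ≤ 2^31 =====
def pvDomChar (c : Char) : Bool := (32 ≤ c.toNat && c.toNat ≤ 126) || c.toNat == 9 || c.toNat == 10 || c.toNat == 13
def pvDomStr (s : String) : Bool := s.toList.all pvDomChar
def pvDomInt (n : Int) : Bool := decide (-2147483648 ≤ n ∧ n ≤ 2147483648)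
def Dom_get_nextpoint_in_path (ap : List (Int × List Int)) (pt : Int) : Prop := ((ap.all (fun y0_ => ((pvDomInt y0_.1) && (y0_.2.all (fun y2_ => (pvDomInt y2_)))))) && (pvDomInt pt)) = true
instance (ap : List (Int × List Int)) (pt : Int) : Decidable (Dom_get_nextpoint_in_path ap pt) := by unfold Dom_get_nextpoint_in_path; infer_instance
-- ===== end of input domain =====

-- B replaces A's scan-and-return-early traversal by building a first-wins successor
-- dictionary once and answering with a single lookup (alternative decomposition, same cost).


-- ===== PORT A =====
-- inner loop: for i in range(len(p)): if p[i]==pt: if i+1<len(p): return p[i+1]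
-- (a match at the last index falls through and the loop ends; exact by structural recursion)
def pvScanA : List Int → Int → Option Int
  | [], _ => none
  | a :: rest, pt => if a = pt then rest.head? else pvScanA rest pt

-- outer loop: for idx in ap: p = ap[idx] …  — iterates the dict's keys in insertion order,
-- looking each value up; equal to walking the dict's values in order.
def pvOuterA : List (List Int) → Int → Option Int
  | [], _ => none
  | p :: rest, pt =>
    match pvScanA p pt with
    | some v => some v
    | none => pvOuterA rest pt

def get_nextpoint_in_path (ap : List (Int × List Int)) (pt : Int) : Option Int :=
  pvOuterA (PySem.Dict.ofList ap).values pt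

-- ===== PORT B =====
-- succ = {}; for p in ap.values(): for a, b in zip(p, p[1:]): succ.setdefault(a, b); return succ.get(pt)
def get_nextpoint_in_path_alt (ap : List (Int × List Int)) (pt : Int) : Option Int :=
  (((PySem.Dict.ofList ap).values).foldl
      (fun succ p => (p.zip p.tail).foldl (fun succ ab => succ.setdefault ab.1 ab.2) succ)
      PySem.Dict.empty).get? pt

-- ===== PRECONDITION & SPEC =====
def Spec_get_nextpoint_in_path (ap : List (Int × List Int)) (pt : Int) (out : Option Int) : Prop := out = get_nextpoint_in_path_alt ap pt
instance (ap : List (Int × List Int)) (pt : Int) (out : Option Int) : Decidable (Spec_get_nextpoint_in_path ap pt out) := by unfold Spec_get_nextpoint_in_path; infer_instance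

-- ===== CLAIM (what is proved, stated in full; the proofs are below) =====
def Claim_equal_get_nextpoint_in_path : Prop := ∀ (ap : List (Int × List Int)) (pt : Int), Dom_get_nextpoint_in_path ap pt → Spec_get_nextpoint_in_path ap pt (get_nextpoint_in_path ap pt)

-- ===== LEMMAS AND PROOFS =====

-- setdefault-folding a pair list: a lookup is the old binding, else the FIRST match in the pairs.
theorem pv_get_foldl_setdefault (pairs : List (Int × Int)) (d : PySem.Dict Int Int) (k : Int) :
    (pairs.foldl (fun succ ab => succ.setdefault ab.1 ab.2) d).get? k
      = (d.get? k).orElse (fun _ => pairs.lookup k) := by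
  induction pairs generalizing d with
  | nil => simp [List.lookup]
  | cons ab rest ih =>
    rcases ab with ⟨a, b⟩
    simp only [List.foldl_cons, ih, List.lookup]
    by_cases hc : d.contains a = true
    · rw [PySem.Dict.setdefault_of_contains _ _ hc]
      by_cases hk : a = k
      · subst hk
        rw [PySem.Dict.contains_eq_isSome_get?] at hc
        rcases Option.isSome_iff_exists.mp hc with ⟨v, hv⟩
        simp [hv]
      · simp [beq_eq_false_iff_ne.mpr (Ne.symm hk)]
    · rw [PySem.Dict.setdefault_of_not_contains _ _ (by simpa using hc)]
      by_cases hk : a = k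
      · subst hk
        have hnone : d.get? a = none := by
          rw [PySem.Dict.contains_eq_isSome_get?] at hc
          exact Option.not_isSome_iff_eq_none.mp (by simpa using hc)
        simp [PySem.Dict.get?_insert_self, hnone]
      · rw [PySem.Dict.get?_insert_of_ne _ _ (Ne.symm hk)]
        simp [beq_eq_false_iff_ne.mpr (Ne.symm hk)]

-- A's inner scan is exactly the first match among a list's adjacent pairs.
theorem pv_scanA_eq_lookup_zip (p : List Int) (pt : Int) :
    pvScanA p pt = (p.zip p.tail).lookup pt := by
  induction p with
  | nil => simp [pvScanA]
  | cons a rest ih =>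
    cases rest with
    | nil => simp [pvScanA]
    | cons b r =>
      by_cases h : a = pt
      · subst h
        simp [pvScanA]
      · rw [pvScanA, if_neg h, ih, List.tail_cons]
        simp [List.lookup, beq_eq_false_iff_ne.mpr (Ne.symm h)]

-- main invariant: B's fold over the value lists, looked up at pt, is the old binding else A's scan.
theorem pv_main (vs : List (List Int)) (d : PySem.Dict Int Int) (pt : Int) :
    (vs.foldl (fun succ p => (p.zip p.tail).foldl (fun succ ab => succ.setdefault ab.1 ab.2) succ) d).get? pt
      = (d.get? pt).orElse (fun _ => pvOuterA vs pt) := by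
  induction vs generalizing d with
  | nil => simp [pvOuterA]
  | cons p rest ih =>
    simp only [List.foldl_cons, ih, pv_get_foldl_setdefault, pvOuterA,
      ← pv_scanA_eq_lookup_zip]
    cases d.get? pt with
    | none =>
      cases h : pvScanA p pt <;> simp [Option.orElse]
    | some v => simp [Option.orElse]

-- ===== VERDICT (by name: the statement is the Claim_ definition above) =====
theorem get_nextpoint_in_path_spec : Claim_equal_get_nextpoint_in_path := by
  intro ap pt _
  unfold Spec_get_nextpoint_in_path get_nextpoint_in_path get_nextpoint_in_path_alt
  rw [pv_main]
  simp [Option.orElse]
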